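-- pv_equiv track=rewrite | github.com/Arilonchik/Learning-python | BeginingPython/exeption.py | check_useless
-- ===== SOURCE A (Python) =====
-- def is_parent(child, parent, par):
--     return child == parent or any(map(lambda p: is_parent(p, parent, par), par[child]))
--
-- def check_useless(ex, par):
--     used = []
--     useless = []
--     for e in ex:
--         for u in used:
--             if is_parent(e, u, par):
--                 useless.append(e)
--                 break
--         used.append(e)
--     return useless
-- ===== SOURCE B (Python) =====
-- def check_useless(ex, par):
--     used = set()
--     useless = []
--     for e in ex:
--         # ancestor set of e (including e): iterative DFS with a visited set;
--         # nodes without an entry in par are treated as parentless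
--         seen = {e}
--         stack = [e]
--         while stack:
--             n = stack.pop()
--             for p in par.get(n, []):
--                 if p not in seen:
--                     seen.add(p)
--                     stack.append(p)
--         if not used.isdisjoint(seen):
--             useless.append(e)
--         used.add(e)
--     return useless
-- ===== Notes on version B (the rewrite author's own statement) =====
-- stated objective: alternative
-- what changed: A tests every earlier element separately with a memory-less recursive ancestor search; B computes each element's ancestor set once by an iterative visited-set DFS (absent nodes treated as parentless) and tests set disjointness against the set of earlier elements.
import Mathlib
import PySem

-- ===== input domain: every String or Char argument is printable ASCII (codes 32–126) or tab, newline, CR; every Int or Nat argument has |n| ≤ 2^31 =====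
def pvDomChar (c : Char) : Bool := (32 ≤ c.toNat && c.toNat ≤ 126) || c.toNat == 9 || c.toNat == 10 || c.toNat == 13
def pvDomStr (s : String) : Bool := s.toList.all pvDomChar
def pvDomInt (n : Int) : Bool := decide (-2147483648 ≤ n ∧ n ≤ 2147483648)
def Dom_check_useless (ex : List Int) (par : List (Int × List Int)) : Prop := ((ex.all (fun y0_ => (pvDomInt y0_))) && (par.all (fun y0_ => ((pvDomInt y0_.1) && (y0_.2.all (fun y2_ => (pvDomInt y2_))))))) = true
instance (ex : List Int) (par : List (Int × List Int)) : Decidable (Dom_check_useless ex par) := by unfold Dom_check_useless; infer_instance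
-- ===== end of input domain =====

-- B replaces A's per-pair memory-less recursive ancestor search by one visited-set DFS per
-- element plus set disjointness against the earlier elements (objective: alternative).

-- dict lookup with default []: exact for Source B's `par.get(n, [])` everywhere; for A's `par[child]`
-- it is exact under Pre_, which guarantees every lookup A actually performs hits a key of par
-- (Python raises KeyError otherwise).
def pvP (par : List (Int × List Int)) (n : Int) : List Int :=
  PySem.Dict.getD (PySem.Dict.mk par) n []

-- ===== PORT A =====
-- is_parent(child, parent, par); the Nat argument is a fuel guard that only makes the
-- recursion total: under Pre_ every call of A that the loop reaches terminates, and the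
-- fuel par.length + 2 is shown (isParent_iff / lazy_isParent below) never to be exhausted.
def isParentF (par : List (Int × List Int)) : Nat → Int → Int → Bool
  | 0, _, _ => false
  | fuel + 1, child, parent =>
      child == parent || (pvP par child).any (fun p => isParentF par fuel p parent)

def check_useless (ex : List Int) (par : List (Int × List Int)) : List Int :=
  (ex.foldl
    (fun (st : List Int × List Int) e =>
      (st.1 ++ [e],
       if st.1.any (fun u => isParentF par (par.length + 2) e u) then st.2 ++ [e] else st.2))
    ([], [])).2

-- ===== PORT B =====
-- the `while stack:` DFS loop of Source B; the Nat argument is a fuel guard that only makes the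
-- loop total: the loop pops each node at most once, so it pops at most 1 + (total number of
-- parent entries in par) times and the fuel below is never exhausted, on every input.
-- Stack top is the list head (Python pushes/pops at the list end: the same LIFO order).
def dfsLoop (par : List (Int × List Int)) : Nat → PySem.Set Int → List Int → PySem.Set Int
  | 0, seen, _ => seen
  | _ + 1, seen, [] => seen
  | fuel + 1, seen, n :: rest =>
      let st := (pvP par n).foldl
        (fun (st : PySem.Set Int × List Int) p =>
          if PySem.Set.contains st.1 p then st else (PySem.Set.add st.1 p, p :: st.2))
        (seen, rest)
      dfsLoop par fuel st.1 st.2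

-- ancestor set of e (including e itself): seen = {e}; stack = [e]; while stack: …
def ancSet (par : List (Int × List Int)) (e : Int) : PySem.Set Int :=
  dfsLoop par (2 * (par.flatMap (fun kv => kv.2)).length + 2) (PySem.Set.ofList [e]) [e]

def check_useless_alt (ex : List Int) (par : List (Int × List Int)) : List Int :=
  (ex.foldl
    (fun (st : PySem.Set Int × List Int) e =>
      (PySem.Set.add st.1 e,
       if !(PySem.Set.isdisjoint st.1 (ancSet par e)) then st.2 ++ [e] else st.2))
    (PySem.Set.empty, [])).2

-- ===== PRECONDITION & SPEC =====
def pvKeys (par : List (Int × List Int)) : List Int := par.map Prod.fst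

-- one peeling step: add every key all of whose parents are already peeled
def pvPeelStep (par : List (Int × List Int)) (s : PySem.Set Int) : PySem.Set Int :=
  PySem.Set.update s ((pvKeys par).filter
    (fun m => (pvP par m).all (fun p => PySem.Set.contains s p)))

-- the fully-clean nodes: n is peeled exactly when n is a key, every node reachable from n
-- through parent links is a key, and no cycle is reachable from n (par.length + 1 rounds
-- suffice: each round peels the next layer of the ancestor order).  On such n, A's recursive
-- is_parent(n, u) terminates for EVERY target u, and it decides ancestry.
def pvPeel (par : List (Int × List Int)) : PySem.Set Int :=
  (pvPeelStep par)^[par.length + 1] PySem.Set.empty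

-- the set of nodes reachable from n through parent links (absent keys contribute no edge)
def pvReach (par : List (Int × List Int)) (n : Int) : PySem.Set Int :=
  (fun s => PySem.Set.update s (s.flatMap (pvP par)))^[par.length + 2] (PySem.Set.ofList [n])

-- A's left-to-right commitment at one node: scanning the parent list, the search reaches
-- and succeeds at some parent p already known to find u0 (p ∈ prev) provided every parent
-- listed before p returns False, i.e. is fully clean and does not reach u0.
def pvCommit (par : List (Int × List Int)) (u0 : Int) (prev : PySem.Set Int) :
    List Int → Bool
  | [] => false
  | p :: ps => PySem.Set.contains prev p ||
      (PySem.Set.contains (pvPeel par) p && !(PySem.Set.contains (pvReach par p) u0)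
        && pvCommit par u0 prev ps)

def pvLazyStep (par : List (Int × List Int)) (u0 : Int) (s : PySem.Set Int) : PySem.Set Int :=
  PySem.Set.update s ((u0 :: pvKeys par).filter
    (fun n => n == u0 || ((pvKeys par).contains n && pvCommit par u0 s (pvP par n))))

-- the nodes n on which A's lazy search is_parent(n, u0) terminates with True even though n
-- need not be fully clean: u0 is found depth-first, left-to-right, before any missing key is
-- looked up or any cycle is entered (least fixpoint; par.length + 2 rounds suffice since a
-- minimal committed path visits distinct keys).
def pvLazy (par : List (Int × List Int)) (u0 : Int) : PySem.Set Int :=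
  (pvLazyStep par u0)^[par.length + 2] PySem.Set.empty

-- Pre_ excludes exactly the inputs on which Python A raises (KeyError on looking up a node
-- that is not a key of par, or unbounded recursion on a cyclic parent chain): each tail
-- element must be fully clean (pvPeel: every is_parent call on it returns) or lazily matched
-- against ex[0] (pvLazy: the very first test already returns True before anything bad is
-- reached); the first element is never looked up at all.
def Pre_check_useless (ex : List Int) (par : List (Int × List Int)) : Prop :=
  ∀ e ∈ ex.tail, ∀ h ∈ ex.head?.toList,
    e ∈ pvPeel par ∨ e ∈ pvLazy par h

instance (ex : List Int) (par : List (Int × List Int)) : Decidable (Pre_check_useless ex par) := by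
  unfold Pre_check_useless; infer_instance

def pvWitness_check_useless : List Int × (List (Int × List Int)) :=
  ([1, 2, 1], [(1, [2]), (2, [])])

def Spec_check_useless (ex : List Int) (par : List (Int × List Int)) (out : List Int) : Prop := out = check_useless_alt ex par
instance (ex : List Int) (par : List (Int × List Int)) (out : List Int) : Decidable (Spec_check_useless ex par out) := by unfold Spec_check_useless; infer_instance

-- ===== CLAIM (what is proved, stated in full; the proofs are below) =====
def Claim_equal_check_useless : Prop := ∀ (ex : List Int) (par : List (Int × List Int)), Dom_check_useless ex par → Pre_check_useless ex par → Spec_check_useless ex par (check_useless ex par)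


-- ===== LEMMAS AND PROOFS =====

-- the parent-of edge relation and reachability (e reaches its ancestors)
def stepR (par : List (Int × List Int)) (a b : Int) : Prop := b ∈ pvP par a
def reachR (par : List (Int × List Int)) : Int → Int → Prop := Relation.ReflTransGen (stepR par)

theorem pvP_mem (par : List (Int × List Int)) (n : Int) :
    pvP par n = [] ∨ (n, pvP par n) ∈ par := by
  induction par with
  | nil => left; simp [pvP, PySem.Dict.getD, PySem.Dict.get?]
  | cons kv rest ih =>
    obtain ⟨k, v⟩ := kv
    by_cases h : k = n
    · right
      have : pvP ((k, v) :: rest) n = v := by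
        simp [pvP, PySem.Dict.getD_eq_get?_getD, PySem.Dict.get?_mk_cons, h]
      rw [this]; subst h; simp
    · have : pvP ((k, v) :: rest) n = pvP rest n := by
        simp [pvP, PySem.Dict.getD_eq_get?_getD, PySem.Dict.get?_mk_cons, h]
      rw [this]
      rcases ih with h1 | h1
      · left; exact h1
      · right; exact List.mem_cons_of_mem _ h1

theorem pvP_sub_flat (par : List (Int × List Int)) (n : Int) :
    ∀ p ∈ pvP par n, p ∈ par.flatMap (fun kv => kv.2) := by
  intro p hp
  rcases pvP_mem par n with h | h
  · rw [h] at hp; cases hp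
  · exact List.mem_flatMap.mpr ⟨(n, pvP par n), h, hp⟩

theorem nodup_subset_length {l l' : List Int} (h : l.Nodup) (hs : l ⊆ l') :
    l.length ≤ l'.length := by
  have h1 : l.Subperm l' := (List.subperm_ext_iff).mpr (fun a ha => by
    have := List.count_pos_iff.mpr (hs ha)
    have h2 : l.count a ≤ 1 := List.nodup_iff_count_le_one.mp h a
    omega)
  exact h1.length_le

-- on a peeled node, A's fuelled is_parent decides ancestry (induction on the peeling round)
theorem isParent_iff (par : List (Int × List Int)) :
    ∀ (n : Nat) (m : Int), m ∈ (pvPeelStep par)^[n] PySem.Set.empty →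
      ∀ (fuel : Nat), n ≤ fuel →
        ∀ (u : Int), (isParentF par fuel m u = true ↔ reachR par m u) := by
  intro n
  induction n with
  | zero =>
    intro m hm
    exact absurd hm (List.not_mem_nil)
  | succ n ih =>
    intro m hm fuel hfuel u
    rw [Function.iterate_succ_apply'] at hm
    unfold pvPeelStep at hm
    rw [PySem.Set.mem_update] at hm
    rcases hm with hm | hm
    · exact ih m hm fuel (by omega) u
    · rw [List.mem_filter] at hm
      obtain ⟨-, hpar⟩ := hm
      have hparS : ∀ p ∈ pvP par m, p ∈ (pvPeelStep par)^[n] PySem.Set.empty := by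
        intro p hp
        have := List.all_eq_true.mp hpar p hp
        exact (PySem.Set.contains_iff _ _).mp this
      cases fuel with
      | zero => omega
      | succ f =>
        simp only [isParentF, Bool.or_eq_true, beq_iff_eq, List.any_eq_true]
        constructor
        · intro h
          rcases h with h | ⟨q, hq, hrec⟩
          · subst h; exact Relation.ReflTransGen.refl
          · have := (ih q (hparS q hq) f (by omega) u).mp hrec
            exact Relation.ReflTransGen.head hq this
        · intro h
          rcases Relation.ReflTransGen.cases_head h with h | ⟨q, hq, hrest⟩
          · left; omega
          · right
            exact ⟨q, hq, (ih q (hparS q hq) f (by omega) u).mpr hrest⟩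

-- from a successful left-to-right commitment, extract the committed parent
theorem pvCommit_exists (par : List (Int × List Int)) (u0 : Int) (prev : PySem.Set Int) :
    ∀ (ps : List Int), pvCommit par u0 prev ps = true → ∃ p ∈ ps, p ∈ prev := by
  intro ps
  induction ps with
  | nil => intro h; cases h
  | cons p ps ih =>
    intro h
    simp only [pvCommit, Bool.or_eq_true, Bool.and_eq_true] at h
    rcases h with h | ⟨-, h⟩
    · exact ⟨p, List.mem_cons_self, (PySem.Set.contains_iff _ _).mp h⟩
    · obtain ⟨q, hq, hqp⟩ := ih h
      exact ⟨q, List.mem_cons_of_mem _ hq, hqp⟩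

-- a lazily matched node makes A's fuelled is_parent return True …
theorem lazy_isParent (par : List (Int × List Int)) (u0 : Int) :
    ∀ (r : Nat) (n : Int), n ∈ (pvLazyStep par u0)^[r] PySem.Set.empty →
      ∀ (fuel : Nat), r ≤ fuel → isParentF par fuel n u0 = true := by
  intro r
  induction r with
  | zero => intro n hn; exact absurd hn (List.not_mem_nil)
  | succ r ih =>
    intro n hn fuel hfuel
    rw [Function.iterate_succ_apply'] at hn
    unfold pvLazyStep at hn
    rw [PySem.Set.mem_update] at hn
    rcases hn with hn | hn
    · exact ih n hn fuel (by omega)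
    · rw [List.mem_filter] at hn
      obtain ⟨-, hn⟩ := hn
      cases fuel with
      | zero => omega
      | succ f =>
        simp only [Bool.or_eq_true, beq_iff_eq, Bool.and_eq_true] at hn
        simp only [isParentF, Bool.or_eq_true, beq_iff_eq, List.any_eq_true]
        rcases hn with hn | ⟨-, hn⟩
        · exact Or.inl hn
        · obtain ⟨p, hp, hprev⟩ := pvCommit_exists par u0 _ _ hn
          exact Or.inr ⟨p, hp, ih p hprev f (by omega)⟩

-- … and it really reaches u0
theorem lazy_reach (par : List (Int × List Int)) (u0 : Int) :
    ∀ (r : Nat) (n : Int), n ∈ (pvLazyStep par u0)^[r] PySem.Set.empty →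
      reachR par n u0 := by
  intro r
  induction r with
  | zero => intro n hn; exact absurd hn (List.not_mem_nil)
  | succ r ih =>
    intro n hn
    rw [Function.iterate_succ_apply'] at hn
    unfold pvLazyStep at hn
    rw [PySem.Set.mem_update] at hn
    rcases hn with hn | hn
    · exact ih n hn
    · rw [List.mem_filter] at hn
      obtain ⟨-, hn⟩ := hn
      simp only [Bool.or_eq_true, beq_iff_eq, Bool.and_eq_true] at hn
      rcases hn with hn | ⟨-, hn⟩
      · subst hn; exact Relation.ReflTransGen.refl
      · obtain ⟨p, hp, hprev⟩ := pvCommit_exists par u0 _ _ hn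
        exact Relation.ReflTransGen.head hp (ih p hprev)

-- properties of the inner for-loop of the DFS (push the unseen parents)
theorem push_props (ps : List Int) :
    ∀ (s : PySem.Set Int) (k : List Int),
      (∀ x ∈ s, x ∈ (ps.foldl (fun (st : PySem.Set Int × List Int) p =>
          if PySem.Set.contains st.1 p then st else (PySem.Set.add st.1 p, p :: st.2)) (s, k)).1) ∧
      (∀ p ∈ ps, p ∈ (ps.foldl (fun (st : PySem.Set Int × List Int) p =>
          if PySem.Set.contains st.1 p then st else (PySem.Set.add st.1 p, p :: st.2)) (s, k)).1) ∧
      (∀ x ∈ (ps.foldl (fun (st : PySem.Set Int × List Int) p =>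
          if PySem.Set.contains st.1 p then st else (PySem.Set.add st.1 p, p :: st.2)) (s, k)).1,
        x ∈ s ∨ x ∈ ps) ∧
      (∀ x ∈ k, x ∈ (ps.foldl (fun (st : PySem.Set Int × List Int) p =>
          if PySem.Set.contains st.1 p then st else (PySem.Set.add st.1 p, p :: st.2)) (s, k)).2) ∧
      (∀ x ∈ (ps.foldl (fun (st : PySem.Set Int × List Int) p =>
          if PySem.Set.contains st.1 p then st else (PySem.Set.add st.1 p, p :: st.2)) (s, k)).2,
        x ∈ k ∨ x ∈ ps) ∧
      ((∀ x ∈ k, x ∈ s) → ∀ x ∈ (ps.foldl (fun (st : PySem.Set Int × List Int) p =>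
          if PySem.Set.contains st.1 p then st else (PySem.Set.add st.1 p, p :: st.2)) (s, k)).2,
        x ∈ (ps.foldl (fun (st : PySem.Set Int × List Int) p =>
          if PySem.Set.contains st.1 p then st else (PySem.Set.add st.1 p, p :: st.2)) (s, k)).1) ∧
      (∀ x ∈ (ps.foldl (fun (st : PySem.Set Int × List Int) p =>
          if PySem.Set.contains st.1 p then st else (PySem.Set.add st.1 p, p :: st.2)) (s, k)).1,
        x ∈ s ∨ x ∈ (ps.foldl (fun (st : PySem.Set Int × List Int) p =>
          if PySem.Set.contains st.1 p then st else (PySem.Set.add st.1 p, p :: st.2)) (s, k)).2) ∧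
      (s.Nodup → (ps.foldl (fun (st : PySem.Set Int × List Int) p =>
          if PySem.Set.contains st.1 p then st else (PySem.Set.add st.1 p, p :: st.2)) (s, k)).1.Nodup) ∧
      ((ps.foldl (fun (st : PySem.Set Int × List Int) p =>
          if PySem.Set.contains st.1 p then st else (PySem.Set.add st.1 p, p :: st.2)) (s, k)).2.length
        + 2 * s.length ≤ k.length + 2 * (ps.foldl (fun (st : PySem.Set Int × List Int) p =>
          if PySem.Set.contains st.1 p then st else (PySem.Set.add st.1 p, p :: st.2)) (s, k)).1.length) := by
  induction ps with
  | nil =>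
    intro s k
    simp only [List.foldl_nil]
    refine ⟨fun x h => h, by simp, fun x h => Or.inl h, fun x h => h,
      fun x h => Or.inl h, fun h => h, ?_, fun h => h, by omega⟩
    intro x hx
    by_cases h : x ∈ k
    · exact Or.inr h
    · exact Or.inl hx
  | cons p ps ih =>
    intro s k
    simp only [List.foldl_cons]
    by_cases hp : PySem.Set.contains s p = true
    · rw [if_pos hp]
      have hpmem : p ∈ s := (PySem.Set.contains_iff s p).mp hp
      obtain ⟨b1, b2, b3, b4, b5, b6, b7, b8, b9⟩ := ih s k
      refine ⟨b1, ?_, ?_, b4, ?_, b6, b7, b8, b9⟩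
      · intro q hq
        rcases List.mem_cons.mp hq with h | h
        · subst h; exact b1 q hpmem
        · exact b2 q h
      · intro x hx
        rcases b3 x hx with h | h
        · exact Or.inl h
        · exact Or.inr (List.mem_cons_of_mem _ h)
      · intro x hx
        rcases b5 x hx with h | h
        · exact Or.inl h
        · exact Or.inr (List.mem_cons_of_mem _ h)
    · rw [if_neg hp]
      have hpnot : p ∉ s := fun h => hp ((PySem.Set.contains_iff s p).mpr h)
      have hadd : PySem.Set.add s p = s ++ [p] := PySem.Set.add_of_not_mem hpnot
      rw [hadd]
      obtain ⟨b1, b2, b3, b4, b5, b6, b7, b8, b9⟩ := ih (s ++ [p]) (p :: k)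
      have hsub : ∀ x ∈ s, x ∈ s ++ [p] := fun x h => List.mem_append_left _ h
      refine ⟨fun x h => b1 x (hsub x h), ?_, ?_, fun x h => b4 x (List.mem_cons_of_mem _ h),
        ?_, ?_, ?_, ?_, ?_⟩
      · intro q hq
        rcases List.mem_cons.mp hq with h | h
        · subst h; exact b1 q (List.mem_append_right _ (List.mem_singleton_self _))
        · exact b2 q h
      · intro x hx
        rcases b3 x hx with h | h
        · rcases List.mem_append.mp h with h2 | h2
          · exact Or.inl h2
          · exact Or.inr (List.mem_cons.mpr (Or.inl (List.mem_singleton.mp h2)))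
        · exact Or.inr (List.mem_cons_of_mem _ h)
      · intro x hx
        rcases b5 x hx with h | h
        · rcases List.mem_cons.mp h with h2 | h2
          · exact Or.inr (List.mem_cons.mpr (Or.inl h2))
          · exact Or.inl h2
        · exact Or.inr (List.mem_cons_of_mem _ h)
      · intro hk
        refine b6 ?_
        intro x hx
        rcases List.mem_cons.mp hx with h | h
        · subst h; exact List.mem_append_right _ (List.mem_singleton_self _)
        · exact hsub x (hk x h)
      · intro x hx
        rcases b7 x hx with h | h
        · rcases List.mem_append.mp h with h2 | h2
          · exact Or.inl h2
          · exact Or.inr (b4 x (List.mem_cons.mpr (Or.inl (List.mem_singleton.mp h2))))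
        · exact Or.inr h
      · intro hnd
        refine b8 ?_
        rw [List.nodup_append]
        refine ⟨hnd, List.nodup_singleton _, ?_⟩
        intro a ha b hb
        rw [List.mem_singleton] at hb
        subst hb
        exact fun h => hpnot (h ▸ ha)
      · simp only [List.length_cons, List.length_append] at b9 ⊢
        omega

-- the DFS loop computes exactly the reachable set, on EVERY input (the visited set makes the
-- number of pops at most 1 + the number of parent entries, so the fuel never runs out)
theorem dfs_spec (par : List (Int × List Int)) (e : Int) :
    ∀ (fuel : Nat) (seen : PySem.Set Int) (stack : List Int),
      seen.Nodup → (∀ x ∈ seen, x ∈ e :: par.flatMap (fun kv => kv.2)) →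
      (∀ x ∈ stack, x ∈ seen) →
      (∀ x ∈ seen, x ∉ stack → ∀ p ∈ pvP par x, p ∈ seen) →
      e ∈ seen → (∀ x ∈ seen, reachR par e x) →
      stack.length + 2 * ((1 + (par.flatMap (fun kv => kv.2)).length) - seen.length) < fuel →
      ∀ m, (m ∈ dfsLoop par fuel seen stack ↔ reachR par e m) := by
  intro fuel
  induction fuel with
  | zero => intro seen stack _ _ _ _ _ _ hm; omega
  | succ f ih =>
    intro seen stack hseenNd hseenB hstack hclosed he hreach hm m
    cases stack with
    | nil =>
      show m ∈ seen ↔ reachR par e m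
      constructor
      · exact fun h => hreach m h
      · intro h
        induction h with
        | refl => exact he
        | tail h1 h2 ih2 => exact hclosed _ ih2 (by simp) _ h2
    | cons n rest =>
      show m ∈ dfsLoop par f _ _ ↔ reachR par e m
      obtain ⟨b1, b2, b3, b4, b5, b6, b7, b8, b9⟩ := push_props (pvP par n) seen rest
      have hrest : ∀ x ∈ rest, x ∈ seen := fun x h => hstack x (List.mem_cons_of_mem _ h)
      have hnseen : n ∈ seen := hstack n List.mem_cons_self
      have hreachn : reachR par e n := hreach n hnseen
      refine ih _ _ (b8 hseenNd) ?_ (b6 hrest) ?_ (b1 e he) ?_ ?_ m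
      · intro x hx
        rcases b3 x hx with h | h
        · exact hseenB x h
        · exact List.mem_cons_of_mem _ (pvP_sub_flat par n x h)
      · intro x hx hnx p hp
        rcases b7 x hx with h | h
        · by_cases hxn : x = n
          · subst hxn; exact b2 p hp
          · have hxrest : x ∉ rest := fun hr => hnx (b4 x hr)
            have : x ∉ n :: rest := by
              intro hc
              rcases List.mem_cons.mp hc with hc | hc
              · exact hxn hc
              · exact hxrest hc
            exact b1 p (hclosed x h this p hp)
        · exact absurd h hnx
      · intro x hx
        rcases b3 x hx with h | h
        · exact hreach x h
        · exact Relation.ReflTransGen.tail hreachn h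
      · have hlen : (List.foldl (fun (st : PySem.Set Int × List Int) p =>
            if PySem.Set.contains st.1 p then st else (PySem.Set.add st.1 p, p :: st.2))
            (seen, rest) (pvP par n)).1.length
              ≤ 1 + (par.flatMap (fun kv => kv.2)).length := by
          have : (e :: par.flatMap (fun kv => kv.2)).length
              = 1 + (par.flatMap (fun kv => kv.2)).length := by
            simp [List.length_cons]; omega
          rw [← this]
          refine nodup_subset_length (b8 hseenNd) ?_
          intro x hx
          rcases b3 x hx with h | h
          · exact hseenB x h
          · exact List.mem_cons_of_mem _ (pvP_sub_flat par n x h)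
        have hsl : seen.length ≤ 1 + (par.flatMap (fun kv => kv.2)).length := by
          have : (e :: par.flatMap (fun kv => kv.2)).length
              = 1 + (par.flatMap (fun kv => kv.2)).length := by
            simp [List.length_cons]; omega
          rw [← this]
          exact nodup_subset_length hseenNd hseenB
        simp only [List.length_cons] at hm
        omega

theorem ancSet_iff (par : List (Int × List Int)) (e : Int) :
    ∀ m, (m ∈ ancSet par e ↔ reachR par e m) := by
  intro m
  show m ∈ dfsLoop par (2 * (par.flatMap (fun kv => kv.2)).length + 2)
    (PySem.Set.ofList [e]) [e] ↔ _
  have hof : PySem.Set.ofList [e] = [e] :=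
    PySem.Set.ofList_eq_self_of_nodup [e] (List.nodup_singleton e)
  rw [hof]
  refine dfs_spec par e (2 * (par.flatMap (fun kv => kv.2)).length + 2) [e] [e]
    (List.nodup_singleton e) ?_ (fun x h => h) ?_ (List.mem_singleton_self e) ?_ ?_ m
  · intro x hx; rw [List.mem_singleton] at hx; subst hx; exact List.mem_cons_self
  · intro x hx hnx; exact absurd hx hnx
  · intro x hx; rw [List.mem_singleton] at hx; subst hx; exact Relation.ReflTransGen.refl
  · simp only [List.length_singleton]; omega

theorem hit_eq (par : List (Int × List Int)) (e : Int)
    (usedA : List Int) (usedB : PySem.Set Int)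
    (hmem : ∀ x, x ∈ usedA ↔ x ∈ usedB)
    (hcase : e ∈ pvPeel par ∨ ∃ h ∈ usedA, e ∈ pvLazy par h) :
    usedA.any (fun u => isParentF par (par.length + 2) e u)
      = !(PySem.Set.isdisjoint usedB (ancSet par e)) := by
  have hanc := ancSet_iff par e
  rcases hcase with hpe | ⟨h, hhA, hhl⟩
  · have hIff : ∀ u, (isParentF par (par.length + 2) e u = true ↔ reachR par e u) :=
      fun u => isParent_iff par (par.length + 1) e hpe (par.length + 2) (by omega) u
    cases hb : PySem.Set.isdisjoint usedB (ancSet par e) with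
    | false =>
      simp only [Bool.not_false]
      rw [List.any_eq_true]
      by_contra hc
      push Not at hc
      have hdisj : PySem.Set.isdisjoint usedB (ancSet par e) = true := by
        refine (PySem.Set.isdisjoint_iff _ _).mpr ?_
        intro x hx hxa
        exact hc x ((hmem x).mpr hx) ((hIff x).mpr ((hanc x).mp hxa))
      rw [hdisj] at hb; cases hb
    | true =>
      simp only [Bool.not_true]
      rw [Bool.eq_false_iff]
      intro h
      obtain ⟨u, hu, hp⟩ := List.any_eq_true.mp h
      have hr : reachR par e u := (hIff u).mp hp
      have := (PySem.Set.isdisjoint_iff _ _).mp hb u ((hmem u).mp hu)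
      exact this ((hanc u).mpr hr)
  · have hA : usedA.any (fun u => isParentF par (par.length + 2) e u) = true :=
      List.any_eq_true.mpr ⟨h, hhA,
        lazy_isParent par h (par.length + 2) e hhl (par.length + 2) (by omega)⟩
    rw [hA]
    cases hb : PySem.Set.isdisjoint usedB (ancSet par e) with
    | false => rfl
    | true =>
      exfalso
      exact (PySem.Set.isdisjoint_iff _ _).mp hb h ((hmem h).mp hhA)
        ((hanc h).mpr (lazy_reach par h (par.length + 2) e hhl))

theorem loop_eq (par : List (Int × List Int)) :
    ∀ (ex : List Int) (usedA : List Int) (usedB : PySem.Set Int) (acc : List Int),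
      (∀ e ∈ ex, e ∈ pvPeel par ∨ ∃ h ∈ usedA, e ∈ pvLazy par h) →
      (∀ x, x ∈ usedA ↔ x ∈ usedB) →
      (ex.foldl
        (fun (st : List Int × List Int) e =>
          (st.1 ++ [e],
           if st.1.any (fun u => isParentF par (par.length + 2) e u) then st.2 ++ [e] else st.2))
        (usedA, acc)).2
      = (ex.foldl
        (fun (st : PySem.Set Int × List Int) e =>
          (PySem.Set.add st.1 e,
           if !(PySem.Set.isdisjoint st.1 (ancSet par e)) then st.2 ++ [e] else st.2))
        (usedB, acc)).2 := by
  intro ex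
  induction ex with
  | nil => intro usedA usedB acc _ _; rfl
  | cons e ex ih =>
    intro usedA usedB acc hgood hmem
    simp only [List.foldl_cons]
    rw [← hit_eq par e usedA usedB hmem (hgood e List.mem_cons_self)]
    refine ih _ _ _ ?_ ?_
    · intro x hx
      rcases hgood x (List.mem_cons_of_mem _ hx) with h | ⟨h0, hh0, hl⟩
      · exact Or.inl h
      · exact Or.inr ⟨h0, List.mem_append_left _ hh0, hl⟩
    · intro x
      rw [List.mem_append, List.mem_singleton, PySem.Set.mem_add, hmem x]

-- ===== VERDICT (by name: the statement is the Claim_ definition above) =====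
theorem check_useless_spec : Claim_equal_check_useless := by
  intro ex par _ hpre
  unfold Spec_check_useless check_useless check_useless_alt
  cases ex with
  | nil => rfl
  | cons h t =>
    simp only [List.foldl_cons]
    have hA : (([] : List Int).any fun u => isParentF par (par.length + 2) h u) = false := rfl
    have hBd : PySem.Set.isdisjoint (PySem.Set.empty : PySem.Set Int) (ancSet par h) = true :=
      (PySem.Set.isdisjoint_iff _ _).mpr (fun x hx => absurd hx (List.not_mem_nil))
    rw [hA, hBd]
    simp only [Bool.not_true, Bool.false_eq_true, if_false, List.nil_append]
    have hBadd : PySem.Set.add (PySem.Set.empty : PySem.Set Int) h = [h] :=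
      PySem.Set.add_of_not_mem (List.not_mem_nil)
    rw [hBadd]
    refine loop_eq par t [h] [h] [] ?_ (fun x => Iff.rfl)
    intro e he
    have hh : h ∈ (h :: t).head?.toList := by simp
    rcases hpre e he h hh with hg | hg
    · exact Or.inl hg
    · exact Or.inr ⟨h, List.mem_singleton_self h, hg⟩
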